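-- pv_equiv track=rewrite | github.com/luckysoo3516/Coding-Dojo | programmers_level3/longest_node.py | solution
-- ===== SOURCE A (Python) =====
-- from collections import defaultdict
--
-- def solution(n, edge):
--     graph = defaultdict(set)
--     for start, end in edge:
--         graph[start].add(end)
--         graph[end].add(start)
--
--     queue = set([1])
--     visited = {key: False for key in graph}
--     visited[1] = True
--
--     while True:
--         new_queue = set()
--         for q in queue:
--             for next in graph[q]:
--                 if not visited[next] and next not in queue:
--                     new_queue.add(next)
--                     visited[next] = True
--
--         if not len(new_queue):
--             return len(queue)
--
--         queue = new_queue
-- ===== SOURCE B (Python) =====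
-- def solution(n, edge):
--     # Level-synchronous distance labelling straight off the edge list (no adjacency
--     # structure): dist maps node -> BFS distance from 1; afterwards count the nodes
--     # at the maximum distance.
--     dist = {1: 0}
--     level = 0
--     while True:
--         frontier = [v for a, b in edge for u, v in ((a, b), (b, a))
--                     if dist.get(u) == level and v not in dist]
--         if not frontier:
--             break
--         level += 1
--         for v in frontier:
--             dist[v] = level
--     m = max(dist.values())
--     return sum(1 for d in dist.values() if d == m)
-- ===== Notes on version B (the rewrite author's own statement) =====
-- stated objective: alternative
-- what changed: A builds an adjacency-set dict and runs a level-by-level frontier BFS with a visited table, returning the size of the last nonempty wave; B never builds a graph: it labels nodes with their BFS distance by rescanning the edge list once per level into a dist dict, then returns the count of nodes at the maximum distance.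
import Mathlib
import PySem

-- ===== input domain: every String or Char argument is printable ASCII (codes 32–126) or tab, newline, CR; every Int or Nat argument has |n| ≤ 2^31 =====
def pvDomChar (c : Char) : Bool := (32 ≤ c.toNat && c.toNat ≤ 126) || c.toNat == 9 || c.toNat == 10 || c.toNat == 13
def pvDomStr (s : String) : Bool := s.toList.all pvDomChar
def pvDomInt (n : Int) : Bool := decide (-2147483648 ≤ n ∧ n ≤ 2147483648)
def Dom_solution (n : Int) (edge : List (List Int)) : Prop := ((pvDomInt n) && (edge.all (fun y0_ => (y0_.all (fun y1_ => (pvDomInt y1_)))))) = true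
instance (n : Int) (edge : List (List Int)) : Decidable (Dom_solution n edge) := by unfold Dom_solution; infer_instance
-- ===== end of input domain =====

-- B replaces A's adjacency-dict frontier BFS (returning the last wave's size) by a distance
-- labelling computed straight off the edge list plus a max-and-count pass; objective: alternative.

-- ===== PORT A =====
-- graph = defaultdict(set); for start, end in edge: graph[start].add(end); graph[end].add(start)
def aGraph (edge : List (List Int)) : PySem.Dict Int (PySem.Set Int) :=
  edge.foldl (fun g row =>
    match row with
    | [s, e] => (g.modify s [] (fun st => PySem.Set.add st e)).modify e [] (fun st => PySem.Set.add st s)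
    | _ => g) PySem.Dict.empty

-- visited = {key: False for key in graph}; visited[1] = True
def aVisited0 (g : PySem.Dict Int (PySem.Set Int)) : PySem.Dict Int Bool :=
  (g.keys.foldl (fun d k => d.insert k false) PySem.Dict.empty).insert 1 true

-- one iteration of the while-loop body: builds new_queue and marks visited.
-- visited[next] is read with getD: on admitted inputs next is always a key of visited
-- (graph is symmetric, so every neighbour is a graph key), so no KeyError occurs.
def aRound (g : PySem.Dict Int (PySem.Set Int)) (queue : PySem.Set Int)
    (visited : PySem.Dict Int Bool) : PySem.Set Int × PySem.Dict Int Bool :=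
  queue.foldl (fun st q =>
    (g.getD q []).foldl (fun st nx =>
      if !(st.2.getD nx false) && !(PySem.Set.contains queue nx)
      then (PySem.Set.add st.1 nx, st.2.insert nx true) else st) st)
    (PySem.Set.empty, visited)

-- while True: … (fuel is only a totality guard; 2*len(edge)+2 rounds always suffice, since
-- every round but the last visits at least one fresh node drawn from the edge list)
def aLoop (g : PySem.Dict Int (PySem.Set Int)) :
    Nat → PySem.Set Int → PySem.Dict Int Bool → Int
  | 0, queue, _ => PySem.Set.len queue
  | fuel+1, queue, visited =>
    let st := aRound g queue visited
    if PySem.Set.len st.1 = 0 then PySem.Set.len queue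
    else aLoop g fuel st.1 st.2

def solution (n : Int) (edge : List (List Int)) : Int :=
  let g := aGraph edge
  aLoop g (2 * edge.length + 2) (PySem.Set.ofList [1]) (aVisited0 g)

-- ===== PORT B =====
-- the two directed pairs (a,b),(b,a) produced from one edge row
def bPairs (row : List Int) : List (Int × Int) :=
  match row with
  | [a, b] => [(a, b), (b, a)]
  | _ => []

-- frontier = [v for a, b in edge for u, v in ((a,b),(b,a)) if dist.get(u) == level and v not in dist]
def bFrontier (edge : List (List Int)) (dist : PySem.Dict Int Int) (level : Int) : List Int :=
  (edge.flatMap bPairs).filterMap (fun p =>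
    if dist.get? p.1 = some level ∧ dist.contains p.2 = false then some p.2 else none)

-- while True: … (same totality guard as A's loop)
def bLoop (edge : List (List Int)) :
    Nat → PySem.Dict Int Int → Int → PySem.Dict Int Int
  | 0, dist, _ => dist
  | fuel+1, dist, level =>
    let fr := bFrontier edge dist level
    if fr.isEmpty then dist
    else bLoop edge fuel (fr.foldl (fun d v => d.insert v (level + 1)) dist) (level + 1)

-- m = max(dist.values()); return sum(1 for d in dist.values() if d == m)
-- (dist always holds key 1, so values is nonempty and the none branch is a totality guard)
def bCount (dist : PySem.Dict Int Int) : Int :=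
  match PySem.List.max? dist.values (fun x => x) with
  | some m => ((dist.values.filter (fun d => d == m)).length : Int)
  | none => 0

def solution_alt (n : Int) (edge : List (List Int)) : Int :=
  bCount (bLoop edge (2 * edge.length + 2) (PySem.Dict.empty.insert 1 0) 0)

-- ===== PRECONDITION & SPEC =====
-- Pre_ excludes exactly the rows on which Python's 'for start, end in edge' raises ValueError
-- (rows whose length is not 2); A raises nowhere else.
def Pre_solution (n : Int) (edge : List (List Int)) : Prop :=
  ∀ row ∈ edge, row.length = 2
instance (n : Int) (edge : List (List Int)) : Decidable (Pre_solution n edge) := by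
  unfold Pre_solution; infer_instance

def pvWitness_solution : Int × List (List Int) := (4, [[1, 2], [2, 3], [1, 4]])

def Spec_solution (n : Int) (edge : List (List Int)) (out : Int) : Prop := out = solution_alt n edge
instance (n : Int) (edge : List (List Int)) (out : Int) : Decidable (Spec_solution n edge out) := by
  unfold Spec_solution; infer_instance

-- ===== CLAIM (what is proved, stated in full; the proofs are below) =====
def Claim_equal_solution : Prop := ∀ (n : Int) (edge : List (List Int)), Dom_solution n edge → Pre_solution n edge → Spec_solution n edge (solution n edge)

-- ===== LEMMAS AND PROOFS =====

-- the invariant tying A's state (queue, visited) after k rounds to B's state (dist, level = k)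
def BfsInv (k : Int) (queue : PySem.Set Int) (visited : PySem.Dict Int Bool)
    (dist : PySem.Dict Int Int) : Prop :=
  queue.Nodup ∧ queue ≠ [] ∧ dist.keys.Nodup ∧ visited.keys.Nodup ∧
  (∀ x, x ∈ queue ↔ dist.get? x = some k) ∧
  (∀ x, visited.getD x false = true ↔ dist.contains x = true) ∧
  (∀ x j, dist.get? x = some j → j ≤ k)

-- A's adjacency sets and B's pair list describe the same graph (non-pair rows are skipped by both)
theorem aGraph_fold (rows : List (List Int)) (g : PySem.Dict Int (PySem.Set Int)) (q x : Int) :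
    x ∈ ((rows.foldl (fun g row =>
      match row with
      | [s, e] => (g.modify s [] (fun st => PySem.Set.add st e)).modify e [] (fun st => PySem.Set.add st s)
      | _ => g) g).getD q []) ↔ x ∈ g.getD q [] ∨ (q, x) ∈ rows.flatMap bPairs := by
  induction rows generalizing g with
  | nil => simp
  | cons row rows ih =>
    match row with
    | [] => simp [bPairs, ih]
    | [a] => simp [bPairs, ih]
    | a :: b :: c :: t => simp [bPairs, ih]
    | [s, e] =>
      rw [List.foldl_cons]
      simp only [ih, List.flatMap_cons, bPairs, List.mem_append, List.mem_cons]
      simp only [PySem.Dict.getD_modify]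
      split_ifs <;> simp_all [PySem.Set.mem_add, Prod.ext_iff] <;> tauto

theorem aGraph_mem (edge : List (List Int)) (q x : Int) :
    x ∈ (aGraph edge).getD q [] ↔ (q, x) ∈ edge.flatMap bPairs := by
  simpa [PySem.Dict.getD_empty] using aGraph_fold edge PySem.Dict.empty q x

-- invariant carried through one round of A's loop
def RndInv (V : PySem.Dict Int Bool) (st : PySem.Set Int × PySem.Dict Int Bool) : Prop :=
  (∀ y, st.2.getD y false = true ↔ (V.getD y false = true ∨ y ∈ st.1)) ∧
    st.1.Nodup ∧ st.2.keys.Nodup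

theorem roundInner (queue : PySem.Set Int) (V : PySem.Dict Int Bool) (ns : List Int)
    (st : PySem.Set Int × PySem.Dict Int Bool) (h : RndInv V st) :
    RndInv V (ns.foldl (fun st nx =>
      if !(st.2.getD nx false) && !(PySem.Set.contains queue nx)
      then (PySem.Set.add st.1 nx, st.2.insert nx true) else st) st) ∧
    (∀ y, y ∈ (ns.foldl (fun st nx =>
      if !(st.2.getD nx false) && !(PySem.Set.contains queue nx)
      then (PySem.Set.add st.1 nx, st.2.insert nx true) else st) st).1 ↔
      y ∈ st.1 ∨ (y ∈ ns ∧ V.getD y false = false ∧ y ∉ queue)) := by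
  induction ns generalizing st with
  | nil => simpa using h
  | cons nx ns ih =>
    obtain ⟨h1, h2, h3⟩ := h
    rw [List.foldl_cons]
    by_cases hc : (!(st.2.getD nx false) && !(PySem.Set.contains queue nx)) = true
    · rw [if_pos hc]
      simp only [Bool.and_eq_true, Bool.not_eq_true'] at hc
      obtain ⟨hv, hqc⟩ := hc
      have hboth : ¬(V.getD nx false = true ∨ nx ∈ st.1) := by
        rw [← h1 nx]; simp [hv]
      rw [not_or] at hboth
      have hV : V.getD nx false = false := by
        rcases hboth with ⟨hb, _⟩
        exact Bool.not_eq_true _ ▸ (by simpa using hb)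
      have hns : nx ∉ st.1 := hboth.2
      have hq : nx ∉ queue := by simpa [PySem.Set.contains_iff] using hqc
      have hinv' : RndInv V (PySem.Set.add st.1 nx, st.2.insert nx true) := by
        refine ⟨fun y => ?_, PySem.Set.nodup_add _ _ h2, PySem.Dict.nodup_keys_insert _ _ _ h3⟩
        rw [PySem.Dict.getD_insert]
        by_cases hy : y = nx
        · simp [hy, PySem.Set.mem_add]
        · simp only [if_neg hy, h1, PySem.Set.mem_add]
          tauto
      obtain ⟨ih1, ih2⟩ := ih _ hinv'
      refine ⟨ih1, fun y => ?_⟩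
      rw [ih2 y, PySem.Set.mem_add]
      by_cases hy : y = nx <;> simp [hy, hV, hq] <;> tauto
    · rw [if_neg hc]
      simp only [Bool.and_eq_true, Bool.not_eq_true', not_and_or] at hc
      obtain ⟨ih1, ih2⟩ := ih _ ⟨h1, h2, h3⟩
      refine ⟨ih1, fun y => ?_⟩
      rw [ih2 y]
      by_cases hy : y = nx
      · subst hy
        rcases hc with hv | hq
        · rw [Bool.not_eq_false] at hv
          have := (h1 y).mp hv
          rcases this with hV | hmem
          · constructor
            · rintro (h | ⟨_, hVf, _⟩)
              · exact Or.inl h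
              · rw [hV] at hVf; cases hVf
            · rintro (h | ⟨_, hVf, _⟩)
              · exact Or.inl h
              · rw [hV] at hVf; cases hVf
          · simp [hmem]
        · rw [Bool.not_eq_false, PySem.Set.contains_iff] at hq
          simp [hq]
      · simp [hy]

theorem roundOuter (g : PySem.Dict Int (PySem.Set Int)) (queue : PySem.Set Int)
    (V : PySem.Dict Int Bool) (qs : List Int)
    (st : PySem.Set Int × PySem.Dict Int Bool) (h : RndInv V st) :
    RndInv V (qs.foldl (fun st q =>
      (g.getD q []).foldl (fun st nx =>
        if !(st.2.getD nx false) && !(PySem.Set.contains queue nx)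
        then (PySem.Set.add st.1 nx, st.2.insert nx true) else st) st) st) ∧
    (∀ y, y ∈ (qs.foldl (fun st q =>
      (g.getD q []).foldl (fun st nx =>
        if !(st.2.getD nx false) && !(PySem.Set.contains queue nx)
        then (PySem.Set.add st.1 nx, st.2.insert nx true) else st) st) st).1 ↔
      y ∈ st.1 ∨ ((∃ q ∈ qs, y ∈ g.getD q []) ∧ V.getD y false = false ∧ y ∉ queue)) := by
  induction qs generalizing st with
  | nil => simpa using h
  | cons q qs ih =>
    rw [List.foldl_cons]
    obtain ⟨hi1, hi2⟩ := roundInner queue V (g.getD q []) st h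
    obtain ⟨ih1, ih2⟩ := ih _ hi1
    refine ⟨ih1, fun y => ?_⟩
    rw [ih2 y, hi2 y]
    simp only [List.mem_cons]
    constructor
    · rintro (((h | ⟨ha, hb, hc⟩) | ⟨⟨q', hq', ha⟩, hb, hc⟩))
      · exact Or.inl h
      · exact Or.inr ⟨⟨q, Or.inl rfl, ha⟩, hb, hc⟩
      · exact Or.inr ⟨⟨q', Or.inr hq', ha⟩, hb, hc⟩
    · rintro (h | ⟨⟨q', hq' | hq', ha⟩, hb, hc⟩)
      · exact Or.inl (Or.inl h)
      · exact Or.inl (Or.inr ⟨hq' ▸ ha, hb, hc⟩)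
      · exact Or.inr ⟨⟨q', hq', ha⟩, hb, hc⟩

theorem aRound_char (g : PySem.Dict Int (PySem.Set Int)) (queue : PySem.Set Int)
    (visited : PySem.Dict Int Bool) (hv : visited.keys.Nodup) :
    (∀ y, y ∈ (aRound g queue visited).1 ↔
      ((∃ q ∈ queue, y ∈ g.getD q []) ∧ visited.getD y false = false ∧ y ∉ queue)) ∧
    (∀ y, (aRound g queue visited).2.getD y false = true ↔
      (visited.getD y false = true ∨ y ∈ (aRound g queue visited).1)) ∧
    (aRound g queue visited).1.Nodup ∧ (aRound g queue visited).2.keys.Nodup := by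
  have h0 : RndInv visited (PySem.Set.empty, visited) :=
    ⟨fun y => by simp [PySem.Set.empty], List.nodup_nil, hv⟩
  obtain ⟨⟨h1, h2, h3⟩, hmem⟩ := roundOuter g queue visited queue (PySem.Set.empty, visited) h0
  exact ⟨fun y => Iff.trans (hmem y) (by simp [PySem.Set.empty]), h1, h2, h3⟩

theorem bFrontier_mem (edge : List (List Int)) (dist : PySem.Dict Int Int) (k x : Int) :
    x ∈ bFrontier edge dist k ↔
      ∃ u, (u, x) ∈ edge.flatMap bPairs ∧ dist.get? u = some k ∧ dist.contains x = false := by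
  simp only [bFrontier, List.mem_filterMap]
  constructor
  · rintro ⟨⟨u, v⟩, hmem, hval⟩
    split_ifs at hval with hcond
    obtain ⟨h1, h2⟩ := hcond
    obtain rfl : v = x := by injection hval
    exact ⟨u, hmem, h1, h2⟩
  · rintro ⟨u, hmem, h1, h2⟩
    exact ⟨(u, x), hmem, by simp [h1, h2]⟩

theorem foldl_insert_const_get? (fr : List Int) (d : PySem.Dict Int Int) (c x : Int) :
    (fr.foldl (fun d v => d.insert v c) d).get? x = if x ∈ fr then some c else d.get? x := by
  induction fr generalizing d with
  | nil => simp
  | cons v fr ih =>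
    rw [List.foldl_cons, ih, PySem.Dict.get?_insert]
    by_cases hf : x ∈ fr <;> by_cases hv : x = v <;> simp [hf, hv]

theorem foldl_insert_const_nodup_keys (fr : List Int) (d : PySem.Dict Int Int) (c : Int)
    (h : d.keys.Nodup) : (fr.foldl (fun d v => d.insert v c) d).keys.Nodup :=
  PySem.Dict.nodup_keys_foldl_insert fr (fun _ _ => c) d h

-- under the invariant, A's answer len(queue) is exactly B's max-distance count
theorem answer_eq (k : Int) (queue : PySem.Set Int) (visited : PySem.Dict Int Bool)
    (dist : PySem.Dict Int Int) (hinv : BfsInv k queue visited dist) :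
    PySem.Set.len queue = bCount dist := by
  obtain ⟨hqn, hqne, hdn, _, hq, _, hbd⟩ := hinv
  have hval : ∀ y ∈ dist.keys, dist.get? y = some (dist.getD y 0) := by
    intro y hy
    have : dist.contains y = true := (PySem.Dict.contains_iff_mem_keys dist y).mpr hy
    rw [PySem.Dict.contains_eq_isSome_get?] at this
    cases hg : dist.get? y with
    | none => rw [hg] at this; simp at this
    | some v => rw [PySem.Dict.getD_of_get?_eq_some dist 0 hg]
  have hvals : dist.values = dist.keys.map (fun y => dist.getD y 0) :=
    PySem.Dict.values_eq_map_keys dist hdn 0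
  obtain ⟨x0, hx0⟩ := List.exists_mem_of_ne_nil queue hqne
  have hx0d : dist.get? x0 = some k := (hq x0).mp hx0
  have hx0k : x0 ∈ dist.keys := by
    rw [← PySem.Dict.contains_iff_mem_keys, PySem.Dict.contains_eq_isSome_get?, hx0d]; rfl
  have hkval : k ∈ dist.values := by
    rw [hvals]
    exact List.mem_map.mpr ⟨x0, hx0k, PySem.Dict.getD_of_get?_eq_some dist 0 hx0d⟩
  have hle : ∀ v ∈ dist.values, v ≤ k := by
    rw [hvals]
    rintro v hv
    obtain ⟨y, hy, rfl⟩ := List.mem_map.mp hv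
    exact hbd y _ (hval y hy)
  have hne : dist.values ≠ [] := fun h => by rw [h] at hkval; cases hkval
  obtain ⟨m, hm⟩ : ∃ m, PySem.List.max? dist.values (fun x => x) = some m := by
    cases hmm : PySem.List.max? dist.values (fun x => x) with
    | none => exact absurd ((PySem.List.max?_eq_none_iff _ _).mp hmm) hne
    | some m => exact ⟨m, rfl⟩
  have hmk : m = k := by
    have h1 : m ≤ k := hle m (PySem.List.max?_mem hm)
    have h2 : k ≤ m := PySem.List.max?_isMax hm k hkval
    omega
  subst hmk
  have hfilt : (dist.values.filter (fun d => d == m)).length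
      = (dist.keys.filter (fun y => decide (dist.get? y = some m))).length := by
    rw [hvals, List.filter_map, List.length_map]
    congr 1
    apply List.filter_congr
    intro y hy
    simp only [Function.comp_apply, hval y hy]
    rcases eq_or_ne (dist.getD y 0) m with h | h <;> simp [h]
  have hperm : queue.Perm (dist.keys.filter (fun y => decide (dist.get? y = some m))) := by
    rw [List.perm_ext_iff_of_nodup hqn (List.Nodup.filter _ hdn)]
    intro a
    rw [List.mem_filter]
    constructor
    · intro ha
      have hd := (hq a).mp ha
      refine ⟨?_, by simp [hd]⟩
      rw [← PySem.Dict.contains_iff_mem_keys, PySem.Dict.contains_eq_isSome_get?, hd]; rfl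
    · rintro ⟨_, hd⟩
      exact (hq a).mpr (by simpa using hd)
  rw [bCount, hm, PySem.Set.len]
  show (queue.length : Int) = ((dist.values.filter (fun d => d == m)).length : Int)
  rw [hfilt, ← hperm.length_eq]

theorem contains_false_not_mem_queue (k : Int) (queue : PySem.Set Int)
    (dist : PySem.Dict Int Int) (hq : ∀ x, x ∈ queue ↔ dist.get? x = some k)
    (x : Int) (hc : dist.contains x = false) : x ∉ queue := by
  intro hx
  have := (hq x).mp hx
  rw [PySem.Dict.contains_eq_isSome_get?, this] at hc
  cases hc

theorem vis_false_iff (visited : PySem.Dict Int Bool) (dist : PySem.Dict Int Int)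
    (h : ∀ x, visited.getD x false = true ↔ dist.contains x = true) (x : Int) :
    visited.getD x false = false ↔ dist.contains x = false := by
  constructor
  · intro hv
    cases hcd : dist.contains x
    · rfl
    · have := (h x).mpr hcd; rw [hv] at this; cases this
  · intro hc
    cases hv : visited.getD x false
    · rfl
    · have := (h x).mp hv; rw [hc] at this; cases this

-- under the invariant, A's new_queue and B's frontier have the same members
theorem round_mem_eq (edge : List (List Int)) (k : Int) (queue : PySem.Set Int)
    (visited : PySem.Dict Int Bool) (dist : PySem.Dict Int Int)
    (hinv : BfsInv k queue visited dist) (x : Int) :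
    x ∈ (aRound (aGraph edge) queue visited).1 ↔ x ∈ bFrontier edge dist k := by
  obtain ⟨hqn, hqne, hdn, hvn, hq, hvis, hbd⟩ := hinv
  obtain ⟨hmem, _, _, _⟩ := aRound_char (aGraph edge) queue visited hvn
  rw [hmem x, bFrontier_mem]
  constructor
  · rintro ⟨⟨q, hqm, hadj⟩, hvf, hxq⟩
    exact ⟨q, (aGraph_mem edge q x).mp hadj, (hq q).mp hqm,
      (vis_false_iff visited dist hvis x).mp hvf⟩
  · rintro ⟨u, hadj, hu, hc⟩
    exact ⟨⟨u, (hq u).mpr hu, (aGraph_mem edge u x).mpr hadj⟩,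
      (vis_false_iff visited dist hvis x).mpr hc,
      contains_false_not_mem_queue k queue dist hq x hc⟩

-- the invariant survives one round
theorem bfsInv_step (edge : List (List Int)) (k : Int) (queue : PySem.Set Int)
    (visited : PySem.Dict Int Bool) (dist : PySem.Dict Int Int)
    (hinv : BfsInv k queue visited dist)
    (hne : (aRound (aGraph edge) queue visited).1 ≠ []) :
    BfsInv (k + 1) (aRound (aGraph edge) queue visited).1 (aRound (aGraph edge) queue visited).2
      ((bFrontier edge dist k).foldl (fun d v => d.insert v (k + 1)) dist) := by
  have hinv' := hinv
  obtain ⟨hqn, hqne, hdn, hvn, hq, hvis, hbd⟩ := hinv'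
  obtain ⟨hmem, hvis', hnd1, hnd2⟩ := aRound_char (aGraph edge) queue visited hvn
  have hre := round_mem_eq edge k queue visited dist hinv
  have hget := fun x => foldl_insert_const_get? (bFrontier edge dist k) dist (k + 1) x
  refine ⟨hnd1, hne, foldl_insert_const_nodup_keys _ _ _ hdn, hnd2, ?_, ?_, ?_⟩
  · intro x
    rw [hre x, hget x]
    by_cases hf : x ∈ bFrontier edge dist k
    · simp [hf]
    · simp only [hf, false_iff, if_neg hf]
      intro hcon
      exact absurd (hbd x _ hcon) (by omega)
  · intro x
    rw [hvis' x, hre x]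
    rw [PySem.Dict.contains_eq_isSome_get?, hget x]
    by_cases hf : x ∈ bFrontier edge dist k
    · simp [hf]
    · rw [if_neg hf]
      simp only [hf, or_false]
      rw [hvis x, PySem.Dict.contains_eq_isSome_get?]
  · intro x j
    rw [hget x]
    by_cases hf : x ∈ bFrontier edge dist k
    · simp only [if_pos hf]
      intro h; injection h with h; omega
    · simp only [if_neg hf]
      intro h; have := hbd x j h; omega

-- the two loops agree step for step, for every fuel value
theorem loop_eq (edge : List (List Int)) (fuel : Nat) (k : Int) (queue : PySem.Set Int)
    (visited : PySem.Dict Int Bool) (dist : PySem.Dict Int Int)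
    (hinv : BfsInv k queue visited dist) :
    aLoop (aGraph edge) fuel queue visited = bCount (bLoop edge fuel dist k) := by
  induction fuel generalizing k queue visited dist with
  | zero => exact answer_eq k queue visited dist hinv
  | succ fuel ih =>
    rw [aLoop, bLoop]
    have hempty : ((aRound (aGraph edge) queue visited).1 = []) ↔
        (bFrontier edge dist k = []) := by
      rw [List.eq_nil_iff_forall_not_mem, List.eq_nil_iff_forall_not_mem]
      constructor <;> intro h x hx
      · exact h x ((round_mem_eq edge k queue visited dist hinv x).mpr hx)
      · exact h x ((round_mem_eq edge k queue visited dist hinv x).mp hx)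
    by_cases he : bFrontier edge dist k = []
    · have ha : (aRound (aGraph edge) queue visited).1 = [] := hempty.mpr he
      rw [if_pos (by simp [PySem.Set.len, ha]), if_pos (by simp [he])]
      exact answer_eq k queue visited dist hinv
    · have ha : (aRound (aGraph edge) queue visited).1 ≠ [] := fun h => he (hempty.mp h)
      rw [if_neg (by simpa [PySem.Set.len, List.length_eq_zero_iff] using ha),
        if_neg (by simpa [List.isEmpty_iff] using he)]
      exact ih _ _ _ _ (bfsInv_step edge k queue visited dist hinv ha)

theorem visited0_getD (ks : List Int) (d : PySem.Dict Int Bool) (x : Int)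
    (h : d.getD x false = false) :
    (ks.foldl (fun d k => d.insert k false) d).getD x false = false := by
  induction ks generalizing d with
  | nil => exact h
  | cons a ks ih =>
    rw [List.foldl_cons]
    exact ih _ (by rw [PySem.Dict.getD_insert]; split_ifs <;> [rfl; exact h])

-- the invariant holds for the initial states of both programs
theorem bfsInv_init (edge : List (List Int)) :
    BfsInv 0 (PySem.Set.ofList [1]) (aVisited0 (aGraph edge)) (PySem.Dict.empty.insert 1 0) := by
  have hq : PySem.Set.ofList [1] = ([1] : List Int) := rfl
  refine ⟨by rw [hq]; simp, by rw [hq]; simp, ?_, ?_, ?_, ?_, ?_⟩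
  · exact PySem.Dict.nodup_keys_insert _ _ _ (by simpa using PySem.Dict.nodup_keys_empty)
  · exact PySem.Dict.nodup_keys_insert _ _ _
      (PySem.Dict.nodup_keys_foldl_insert _ (fun _ _ => false) _
        (by simpa using PySem.Dict.nodup_keys_empty))
  · intro x
    rw [hq]
    simp only [List.mem_singleton, PySem.Dict.get?_insert, PySem.Dict.get?_empty]
    split_ifs with h <;> simp [h]
  · intro x
    rw [aVisited0, PySem.Dict.getD_insert, PySem.Dict.contains_eq_isSome_get?]
    simp only [PySem.Dict.get?_insert, PySem.Dict.get?_empty]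
    split_ifs with h
    · simp
    · rw [visited0_getD _ _ _ (by simp [PySem.Dict.getD_empty])]
      simp
  · intro x j
    simp only [PySem.Dict.get?_insert, PySem.Dict.get?_empty]
    split_ifs with h
    · intro hj; injection hj with hj; omega
    · intro hj; cases hj

-- ===== VERDICT (by name: the statement is the Claim_ definition above) =====
theorem solution_spec : Claim_equal_solution := by
  intro n edge _ _
  unfold Spec_solution solution solution_alt
  exact loop_eq edge _ 0 _ _ _ (bfsInv_init edge)
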